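-- pv_equiv track=rewrite | github.com/pypi-data/pypi-mirror-361 | packages/ursina/ursina-8.0.0-py3-none-any.whl/ursina/shaders/ursina_shader_lang.py | add_semicolons
-- ===== SOURCE A (Python) =====
-- def add_semicolons(text):
--     lines = text.split('\n')
--
--     special_characters = '{}'
--     for i in range(len(lines)):
--         continue_outer = False
--         if not lines[i]:
--             continue
--
--         for char in special_characters:
--             if lines[i].endswith(char):
--                 continue_outer = True
--
--         if continue_outer:
--             continue
--
--         lines[i] = f'{lines[i]};'
--
--     return '\n'.join(lines)
-- ===== SOURCE B (Python) =====
-- def add_semicolons(text):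
--     # One pass over the characters, no split/join of an intermediate line list:
--     # track the last character of the current line and emit ';' before each
--     # newline (and at end of text) when the line is non-empty and does not
--     # end in '{' or '}'.
--     out = []
--     last = None
--     for ch in text:
--         if ch == '\n':
--             if last is not None and last not in '{}':
--                 out.append(';')
--             out.append('\n')
--             last = None
--         else:
--             out.append(ch)
--             last = ch
--     if last is not None and last not in '{}':
--         out.append(';')
--     return ''.join(out)
-- ===== Notes on version B (the rewrite author's own statement) =====
-- stated objective: simpler
-- what changed: Replaces split-into-lines + index loop over a line list + join with a single left-to-right pass over the characters that tracks only the last character of the current line and emits the semicolon before each newline (and at end of text) exactly when the line is non-empty and does not end in a brace.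
import Mathlib
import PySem

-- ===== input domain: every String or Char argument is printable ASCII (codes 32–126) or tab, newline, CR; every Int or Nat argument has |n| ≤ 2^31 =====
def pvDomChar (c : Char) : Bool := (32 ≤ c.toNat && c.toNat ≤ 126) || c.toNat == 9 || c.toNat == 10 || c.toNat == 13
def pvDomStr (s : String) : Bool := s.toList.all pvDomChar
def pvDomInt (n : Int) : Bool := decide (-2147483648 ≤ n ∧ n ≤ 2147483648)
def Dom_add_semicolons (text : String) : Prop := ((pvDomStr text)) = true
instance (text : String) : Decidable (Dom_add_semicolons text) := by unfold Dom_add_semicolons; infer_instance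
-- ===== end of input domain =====

-- B replaces A's split('\n') / per-line loop / join with a single pass over the characters,
-- tracking only the last character of the current line; objective: simpler, same cost.

-- ===== PORT A =====
-- per-index body of A's loop: skip empty lines, skip lines ending in '{' or '}',
-- otherwise append ';' (the inner `for char in special_characters` loop is the foldl)
def addSemiLineA (line : List Char) : List Char :=
  if line = [] then line
  else
    let continue_outer :=
      ['{', '}'].foldl (fun acc ch => if PySem.Chars.endswith line [ch] then true else acc) false
    if continue_outer then line else line ++ [';']

def add_semicolons (text : String) : String :=
  let lines := PySem.Chars.splitOn text.toList ['\n']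
  let lines := lines.map addSemiLineA
  String.ofList (PySem.Chars.join ['\n'] lines)

-- ===== PORT B =====
-- `[';'] if last is not None and last not in '{}' else []`
def semiB (last : Option Char) : List Char :=
  match last with
  | none => []
  | some c => if c = '{' ∨ c = '}' then [] else [';']

def add_semicolons_alt (text : String) : String :=
  let s := text.toList.foldl
    (fun (s : List Char × Option Char) ch =>
      if ch = '\n' then (s.1 ++ semiB s.2 ++ ['\n'], (none : Option Char))
      else (s.1 ++ [ch], some ch))
    ([], none)
  String.ofList (s.1 ++ semiB s.2)

-- ===== PRECONDITION & SPEC =====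
def Spec_add_semicolons (text : String) (out : String) : Prop := out = add_semicolons_alt text
instance (text : String) (out : String) : Decidable (Spec_add_semicolons text out) := by unfold Spec_add_semicolons; infer_instance

-- ===== CLAIM (what is proved, stated in full; the proofs are below) =====
def Claim_equal_add_semicolons : Prop := ∀ (text : String), Dom_add_semicolons text → Spec_add_semicolons text (add_semicolons text)

-- ===== LEMMAS AND PROOFS =====

-- prepend x to the head piece of a split (the head piece is the current line)
def consHead (x : List Char) : List (List Char) → List (List Char)
  | [] => [x]
  | y :: ys => (x ++ y) :: ys

-- reference split on '\n'
def sp : List Char → List (List Char)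
  | [] => [[]]
  | c :: rest => if c = '\n' then [] :: sp rest else consHead [c] (sp rest)

-- what both programs emit after a line-prefix whose last char is `last`
def emit : Option Char → List Char → List Char
  | last, [] => semiB last
  | last, c :: cs => if c = '\n' then semiB last ++ '\n' :: emit none cs else c :: emit (some c) cs

lemma consHead_ne_nil (x : List Char) (l : List (List Char)) : consHead x l ≠ [] := by
  cases l <;> simp [consHead]

lemma sp_ne_nil (cs : List Char) : sp cs ≠ [] := by
  induction cs with
  | nil => simp [sp]
  | cons c rest ih => by_cases h : c = '\n' <;> simp [sp, h, consHead_ne_nil]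

lemma consHead_nil (l : List (List Char)) (h : l ≠ []) : consHead [] l = l := by
  cases l with
  | nil => exact absurd rfl h
  | cons y ys => simp [consHead]

lemma consHead_consHead (x y : List Char) (l : List (List Char)) :
    consHead x (consHead y l) = consHead (x ++ y) l := by
  cases l <;> simp [consHead]

lemma go_spec : ∀ (fuel : Nat) (l cur : List Char) (acc : List (List Char)),
    l.length ≤ fuel →
    PySem.Chars.splitOn.go ['\n'] fuel l cur acc = acc.reverse ++ consHead cur.reverse (sp l) := by
  intro fuel
  induction fuel with
  | zero =>
    intro l cur acc h
    have hl : l = [] := List.eq_nil_of_length_eq_zero (Nat.le_zero.mp h)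
    subst hl
    simp [PySem.Chars.splitOn.go, sp, consHead]
  | succ f ih =>
    intro l cur acc h
    cases l with
    | nil => simp [PySem.Chars.splitOn.go, sp, consHead]
    | cons c rest =>
      by_cases hc : c = '\n'
      · subst hc
        have hpre : List.isPrefixOf ['\n'] ('\n' :: rest) = true := by
          simp [List.isPrefixOf]
        rw [PySem.Chars.splitOn.go]
        simp only [hpre, if_pos]
        rw [show List.drop (['\n'] : List Char).length ('\n' :: rest) = rest from by simp]
        rw [ih rest [] (cur.reverse :: acc) (by simpa using Nat.le_of_succ_le_succ h)]
        simp only [List.reverse_nil]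
        rw [consHead_nil _ (sp_ne_nil rest)]
        simp [sp, consHead]
      · have hpre : List.isPrefixOf ['\n'] (c :: rest) = false := by
          simp [List.isPrefixOf, Ne.symm hc]
        rw [PySem.Chars.splitOn.go]
        simp only [hpre, Bool.false_eq_true, if_neg, not_false_iff]
        rw [ih rest (c :: cur) acc (by simpa using Nat.le_of_succ_le_succ h)]
        simp [sp, hc, consHead_consHead]

lemma splitOn_nl (cs : List Char) : PySem.Chars.splitOn cs ['\n'] = sp cs := by
  unfold PySem.Chars.splitOn
  rw [go_spec (cs.length + 1) cs [] [] (by omega)]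
  simpa using consHead_nil _ (sp_ne_nil cs)

lemma sp_no_nl (p : List Char) (h : '\n' ∉ p) : sp p = [p] := by
  induction p with
  | nil => simp [sp]
  | cons c rest ih =>
    have hc : c ≠ '\n' := fun e => h (by simp [e])
    have : sp rest = [rest] := ih (fun m => h (by simp [m]))
    simp [sp, hc, this, consHead]

lemma sp_break (p t : List Char) (h : '\n' ∉ p) : sp (p ++ '\n' :: t) = p :: sp t := by
  induction p with
  | nil => simp [sp]
  | cons c rest ih =>
    have hc : c ≠ '\n' := fun e => h (by simp [e])
    have := ih (fun m => h (by simp [m]))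
    simp [sp, hc, this, consHead]

lemma suffix_singleton_concat (q : List Char) (a c : Char) :
    ([c] <:+ (q ++ [a])) ↔ a = c := by
  constructor
  · rintro ⟨t, ht⟩
    have := congrArg List.getLast? ht
    simpa [List.getLast?_concat] using this.symm
  · rintro rfl; exact ⟨q, rfl⟩

lemma endswith_concat (q : List Char) (a c : Char) :
    PySem.Chars.endswith (q ++ [a]) [c] = decide (a = c) := by
  cases h : PySem.Chars.endswith (q ++ [a]) [c] with
  | true =>
    have := (suffix_singleton_concat q a c).mp ((PySem.Chars.endswith_iff _ _).mp h)
    simp [this]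
  | false =>
    have : ¬ a = c := fun e =>
      by simp [(PySem.Chars.endswith_iff _ _).mpr ((suffix_singleton_concat q a c).mpr e)] at h
    simp [this]

lemma addSemiLineA_eq (p : List Char) : addSemiLineA p = p ++ semiB p.getLast? := by
  rcases List.eq_nil_or_concat p with h | ⟨q, a, h⟩
  · subst h; simp [addSemiLineA, semiB]
  · subst h
    by_cases h1 : a = '{'
    · subst h1; simp [addSemiLineA, endswith_concat, semiB]
    · by_cases h2 : a = '}'
      · subst h2; simp [addSemiLineA, endswith_concat, semiB]
      · simp [addSemiLineA, endswith_concat, semiB, h1, h2]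

lemma joinA (cs : List Char) : ∀ (p : List Char), '\n' ∉ p →
    PySem.Chars.join ['\n'] ((sp (p ++ cs)).map addSemiLineA) = p ++ emit p.getLast? cs := by
  induction cs with
  | nil =>
    intro p h
    rw [List.append_nil, sp_no_nl p h]
    simp [PySem.Chars.join_singleton, addSemiLineA_eq, emit]
  | cons c cs' ih =>
    intro p h
    by_cases hc : c = '\n'
    · subst hc
      rw [sp_break p cs' h]
      obtain ⟨y, ys, hsp⟩ : ∃ y ys, sp cs' = y :: ys := by
        cases hy : sp cs' with
        | nil => exact absurd hy (sp_ne_nil cs')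
        | cons y ys => exact ⟨y, ys, rfl⟩
      have hih := ih [] (by simp)
      simp only [List.nil_append, List.getLast?_nil] at hih
      simp only [List.map_cons, hsp]
      rw [PySem.Chars.join_cons_cons]
      rw [show (addSemiLineA y :: ys.map addSemiLineA) = (sp cs').map addSemiLineA from by
        simp [hsp]] at *
      rw [hih, addSemiLineA_eq]
      simp [emit]
    · have h' : '\n' ∉ p ++ [c] := by
        intro m; rcases List.mem_append.mp m with m | m
        · exact h m
        · have : '\n' = c := by simpa using m
          exact hc this.symm
      have := ih (p ++ [c]) h'
      rw [List.append_assoc] at this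
      simp only [List.singleton_append] at this
      rw [this]
      simp [emit, hc, List.getLast?_concat]

lemma foldl_emit (cs : List Char) : ∀ (out : List Char) (last : Option Char),
    (cs.foldl
      (fun (s : List Char × Option Char) ch =>
        if ch = '\n' then (s.1 ++ semiB s.2 ++ ['\n'], (none : Option Char))
        else (s.1 ++ [ch], some ch))
      (out, last)).1
    ++ semiB (cs.foldl
      (fun (s : List Char × Option Char) ch =>
        if ch = '\n' then (s.1 ++ semiB s.2 ++ ['\n'], (none : Option Char))
        else (s.1 ++ [ch], some ch))
      (out, last)).2
    = out ++ emit last cs := by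
  induction cs with
  | nil => intro out last; simp [emit]
  | cons c cs' ih =>
    intro out last
    by_cases hc : c = '\n'
    · subst hc
      simp only [List.foldl_cons, if_pos rfl]
      rw [ih]
      simp [emit]
    · simp only [List.foldl_cons, if_neg hc]
      rw [ih]
      simp [emit, hc]

-- ===== VERDICT (by name: the statement is the Claim_ definition above) =====
theorem add_semicolons_spec : Claim_equal_add_semicolons := by
  intro text _
  unfold Spec_add_semicolons add_semicolons add_semicolons_alt
  rw [splitOn_nl]
  have h1 := joinA text.toList [] (by simp)
  simp only [List.nil_append, List.getLast?_nil] at h1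
  have h2 := foldl_emit text.toList [] none
  simp only [List.nil_append] at h2
  simp only [h1, h2]
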